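-- pv_equiv track=rewrite | github.com/icebeartellsnolies/leetcode | site_code/leet code/remove_dup_letters_316.py | remove_dup_letters
-- ===== SOURCE A (Python) =====
-- from collections import Counter
--
-- def remove_dup_letters(s):
--     count=Counter(s)
--     ans=""
--     for i in range(len(s)):
--         if count[s[i]]>1:
--             count[s[i]]-=1
--         else:
--             ans+=s[i]
--     return ans
-- ===== SOURCE B (Python) =====
-- def remove_dup_letters(s):
--     seen = set()
--     out = []
--     for c in reversed(s):
--         if c not in seen:
--             seen.add(c)
--             out.append(c)
--     return ''.join(reversed(out))
-- ===== Notes on version B (the rewrite author's own statement) =====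
-- stated objective: idiomatic
-- what changed: Replaces the decrementing Counter pass with a backward scan keeping a seen-set (each character emitted at its first occurrence from the right, collected list reversed at the end), avoiding Counter bookkeeping and repeated string concatenation.
import Mathlib
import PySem

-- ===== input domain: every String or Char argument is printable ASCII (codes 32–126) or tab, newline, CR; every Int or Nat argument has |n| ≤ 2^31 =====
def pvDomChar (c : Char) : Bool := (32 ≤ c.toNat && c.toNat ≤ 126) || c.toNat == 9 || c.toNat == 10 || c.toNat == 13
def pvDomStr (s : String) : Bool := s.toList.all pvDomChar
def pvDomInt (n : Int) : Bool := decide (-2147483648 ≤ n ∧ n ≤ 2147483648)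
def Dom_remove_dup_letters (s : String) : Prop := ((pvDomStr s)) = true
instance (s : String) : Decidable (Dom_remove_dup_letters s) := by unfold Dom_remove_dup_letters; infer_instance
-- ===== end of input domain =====

-- B replaces A's decrementing Counter pass with a backward scan over the string keeping a
-- seen-set, then reverses the collected characters (same O(n) cost, more idiomatic).

-- ===== PORT A =====
-- Counter decremented while scanning forward; a char is appended when its count has dropped to 1.
def remove_dup_letters (s : String) : String :=
  let count := PySem.Dict.counter s.toList
  let r := s.toList.foldl
    (fun (st : List Char × PySem.Dict Char Int) c =>
      if st.2.getD c 0 > 1 then (st.1, st.2.modify c 0 (· - 1))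
      else (st.1 ++ [c], st.2))
    ([], count)
  String.ofList r.1

-- ===== PORT B =====
-- reverse scan with a seen-set, collected list reversed at the end.
def remove_dup_letters_alt (s : String) : String :=
  let r := s.toList.reverse.foldl
    (fun (st : PySem.Set Char × List Char) c =>
      if st.1.contains c then st else (st.1.add c, st.2 ++ [c]))
    (PySem.Set.empty, [])
  String.ofList r.2.reverse

-- ===== PRECONDITION & SPEC =====
def Spec_remove_dup_letters (s : String) (out : String) : Prop := out = remove_dup_letters_alt s
instance (s : String) (out : String) : Decidable (Spec_remove_dup_letters s out) := by unfold Spec_remove_dup_letters; infer_instance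

-- ===== CLAIM (what is proved, stated in full; the proofs are below) =====
def Claim_equal_remove_dup_letters : Prop := ∀ (s : String), Dom_remove_dup_letters s → Spec_remove_dup_letters s (remove_dup_letters s)

-- ===== LEMMAS AND PROOFS =====

-- spec: keep each character only at its last occurrence
def keepLast : List Char → List Char
  | [] => []
  | c :: t => if c ∈ t then keepLast t else c :: keepLast t

theorem mem_keepLast (x : Char) (l : List Char) : x ∈ keepLast l ↔ x ∈ l := by
  induction l with
  | nil => simp [keepLast]
  | cons c t ih =>
    simp only [keepLast]
    by_cases h : c ∈ t
    · simp [h, ih]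
      intro hx; subst hx; exact h
    · simp [h, ih]

theorem portA_loop (l : List Char) (acc : List Char) (d : PySem.Dict Char Int)
    (hinv : ∀ c ∈ l, d.getD c 0 = (l.count c : Int)) :
    (l.foldl
      (fun (st : List Char × PySem.Dict Char Int) c =>
        if st.2.getD c 0 > 1 then (st.1, st.2.modify c 0 (· - 1))
        else (st.1 ++ [c], st.2))
      (acc, d)).1 = acc ++ keepLast l := by
  induction l generalizing acc d with
  | nil => simp [keepLast]
  | cons c t ih =>
    have hc : d.getD c 0 = ((t.count c : Int) + 1) := by
      have := hinv c (by simp)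
      simpa [List.count_cons_self] using this
    by_cases hmem : c ∈ t
    · have hpos : 0 < t.count c := List.count_pos_iff.2 hmem
      have hgt : d.getD c 0 > 1 := by rw [hc]; exact_mod_cast by omega
      simp only [List.foldl_cons, hgt, if_pos]
      rw [ih (acc := acc) (d := d.modify c 0 (· - 1))]
      · simp [keepLast, hmem]
      · intro x hx
        rw [PySem.Dict.getD_modify]
        by_cases hxc : x = c
        · subst hxc; simp [hc]
        · simp only [hxc, if_false]
          have := hinv x (by simp [hx])
          simpa [List.count_cons, Ne.symm hxc] using this
    · have hz : t.count c = 0 := List.count_eq_zero.2 hmem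
      have hngt : ¬ d.getD c 0 > 1 := by rw [hc, hz]; norm_num
      simp only [List.foldl_cons, hngt, if_neg, not_false_iff]
      rw [ih (acc := acc ++ [c]) (d := d)]
      · simp [keepLast, hmem]
      · intro x hx
        have hxc : x ≠ c := fun h => hmem (h ▸ hx)
        have := hinv x (by simp [hx])
        simpa [List.count_cons, Ne.symm hxc] using this

theorem portA_eq_keepLast (s : String) :
    remove_dup_letters s = String.ofList (keepLast s.toList) := by
  show (s.toList.foldl
      (fun (st : List Char × PySem.Dict Char Int) c =>
        if st.2.getD c 0 > 1 then (st.1, st.2.modify c 0 (· - 1))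
        else (st.1 ++ [c], st.2))
      ([], PySem.Dict.counter s.toList)).1.asString = _
  rw [show (List.asString : List Char → String) = String.ofList from rfl]
  rw [portA_loop]
  · simp
  · intro c _; exact PySem.Dict.getD_counter s.toList c

theorem portB_loop (l : List Char) (a : List Char) :
    l.foldl
      (fun (st : PySem.Set Char × List Char) c =>
        if st.1.contains c then st else (st.1.add c, st.2 ++ [c]))
      (a, a) = (l.foldl PySem.Set.add a, l.foldl PySem.Set.add a) := by
  induction l generalizing a with
  | nil => simp
  | cons c t ih =>
    simp only [List.foldl_cons]
    by_cases h : PySem.Set.contains a c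
    · have : PySem.Set.add a c = a := by
        have hm : c ∈ a := by simpa [PySem.Set.contains] using h
        simp [PySem.Set.add, PySem.Set.contains, hm]
      simp only [h, if_pos, this]
      exact ih a
    · have : PySem.Set.add a c = a ++ [c] := by
        have hm : c ∉ a := by simpa [PySem.Set.contains] using h
        simp [PySem.Set.add, PySem.Set.contains, hm]
      simp only [h, if_neg, not_false_iff, Bool.false_eq_true, this]
      exact ih (a ++ [c])

theorem portB_eq (s : String) :
    remove_dup_letters_alt s = String.ofList (PySem.Set.ofList s.toList.reverse).reverse := by
  unfold remove_dup_letters_alt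
  rw [show (PySem.Set.empty : PySem.Set Char) = ([] : List Char) from rfl]
  rw [portB_loop s.toList.reverse []]
  rw [PySem.Set.ofList_eq_foldl]

theorem ofList_reverse_eq (l : List Char) :
    PySem.Set.ofList l.reverse = (keepLast l).reverse := by
  induction l with
  | nil => simp [keepLast, PySem.Set.ofList_nil]
  | cons c t ih =>
    rw [List.reverse_cons, PySem.Set.ofList_append_singleton, ih]
    by_cases h : c ∈ t
    · simp [keepLast, h, PySem.Set.add, PySem.Set.contains, mem_keepLast]
    · simp [keepLast, h, PySem.Set.add, PySem.Set.contains, mem_keepLast]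

-- ===== VERDICT (by name: the statement is the Claim_ definition above) =====
theorem remove_dup_letters_spec : Claim_equal_remove_dup_letters := by
  intro s _
  unfold Spec_remove_dup_letters
  rw [portA_eq_keepLast, portB_eq, ofList_reverse_eq, List.reverse_reverse]
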